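-- pv_equiv track=rewrite | github.com/aneesnizam/encryption | encode/home/views.py | sequenced
-- ===== SOURCE A (Python) =====
-- def sequenced(n):
--     arr=[]
--     i=0
--     # creating the sequence required for
--     # implementing railfence cipher
--     # the sequence is stored in array
--     while(i<n-1):
--         arr.append(i)
--         i+=1
--     while(i>0):
--         arr.append(i)
--         i-=1
--     return(arr)
-- ===== SOURCE B (Python) =====
-- def sequenced(n):
--     m = n - 1
--     return [m - abs(k - m) for k in range(2 * m)]
-- ===== Notes on version B (the rewrite author's own statement) =====
-- stated objective: simpler
-- what changed: Replaces the two directional while-loops (count up then count down) with a single pass over range(2*(n-1)) using the reflection formula m - abs(k - m).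
import Mathlib
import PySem

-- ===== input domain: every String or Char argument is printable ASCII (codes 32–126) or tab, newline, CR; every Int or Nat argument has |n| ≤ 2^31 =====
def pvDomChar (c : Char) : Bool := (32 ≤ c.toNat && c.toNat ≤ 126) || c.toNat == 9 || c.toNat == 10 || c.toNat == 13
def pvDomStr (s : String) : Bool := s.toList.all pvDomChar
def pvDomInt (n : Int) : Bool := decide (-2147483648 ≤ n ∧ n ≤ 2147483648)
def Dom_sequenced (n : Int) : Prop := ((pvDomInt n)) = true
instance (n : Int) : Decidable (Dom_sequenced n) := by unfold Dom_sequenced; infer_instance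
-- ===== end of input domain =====

-- B replaces A's two directional counting loops with one pass over range(2*(n-1))
-- using the reflection formula m - abs(k - m); simpler, same O(n) cost.

-- ===== PORT A =====
-- first while loop: while i < n-1: arr.append(i); i += 1   (returns final arr and i)
def seqLoop1 (n i : Int) (arr : List Int) : List Int × Int :=
  if _h : i < n - 1 then seqLoop1 n (i + 1) (arr ++ [i]) else (arr, i)
termination_by (n - 1 - i).toNat
decreasing_by omega

-- second while loop: while i > 0: arr.append(i); i -= 1
def seqLoop2 (i : Int) (arr : List Int) : List Int :=
  if _h : 0 < i then seqLoop2 (i - 1) (arr ++ [i]) else arr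
termination_by i.toNat
decreasing_by omega

def sequenced (n : Int) : List Int :=
  let p := seqLoop1 n 0 []
  seqLoop2 p.2 p.1

-- ===== PORT B =====
def sequenced_alt (n : Int) : List Int :=
  (PySem.List.pyRange 0 (2 * (n - 1)) 1).map (fun k => (n - 1) - |k - (n - 1)|)

-- ===== PRECONDITION & SPEC =====
def Spec_sequenced (n : Int) (out : List Int) : Prop := out = sequenced_alt n
instance (n : Int) (out : List Int) : Decidable (Spec_sequenced n out) := by unfold Spec_sequenced; infer_instance

-- ===== CLAIM (what is proved, stated in full; the proofs are below) =====
def Claim_equal_sequenced : Prop := ∀ (n : Int), Dom_sequenced n → Spec_sequenced n (sequenced n)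

-- ===== LEMMAS AND PROOFS =====

-- first loop appends i, i+1, …, n-2 and leaves i = n-1 (when it runs at least once)
theorem seqLoop1_char (k : Nat) : ∀ (n i : Int) (arr : List Int), i + k = n - 1 →
    seqLoop1 n i arr = (arr ++ PySem.List.pyRange i (n - 1) 1, n - 1) := by
  induction k with
  | zero =>
    intro n i arr h
    rw [seqLoop1, PySem.List.pyRange_one_eq_nil (by omega)]
    simp only [show ¬ i < n - 1 by omega, dite_false, List.append_nil]
    exact Prod.ext rfl (by omega)
  | succ k ih =>
    intro n i arr h
    rw [seqLoop1]
    simp only [show i < n - 1 by omega, dite_true]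
    rw [ih n (i + 1) _ (by omega),
        PySem.List.pyRange_one_cons (a := i) (b := n - 1) (show i < n - 1 by omega)]
    simp [List.append_assoc]

-- second loop appends i, i-1, …, 1
theorem seqLoop2_char (k : Nat) : ∀ (i : Int) (arr : List Int), i = k →
    seqLoop2 i arr = arr ++ PySem.List.pyRange i 0 (-1) := by
  induction k with
  | zero =>
    intro i arr h
    rw [seqLoop2, PySem.List.pyRange_neg_one_eq_nil (by omega)]
    simp only [show ¬ 0 < i by omega, dite_false, List.append_nil]
  | succ k ih =>
    intro i arr h
    rw [seqLoop2]
    simp only [show 0 < i by omega, dite_true]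
    rw [ih (i - 1) _ (by omega),
        PySem.List.pyRange_neg_one_cons (a := i) (b := 0) (show (0:Int) < i by omega)]
    simp [List.append_assoc]

theorem sequenced_spec_aux (n : Int) : sequenced n = sequenced_alt n := by
  unfold sequenced sequenced_alt
  by_cases hn : n ≤ 1
  · rw [seqLoop1]
    simp only [show ¬ (0:Int) < n - 1 by omega, dite_false]
    rw [seqLoop2]
    simp only [show ¬ (0:Int) < 0 by omega, dite_false]
    rw [PySem.List.pyRange_one_eq_nil (by omega), List.map_nil]
  · rw [seqLoop1_char (n - 1).toNat n 0 [] (by omega)]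
    simp only
    rw [seqLoop2_char (n - 1).toNat (n - 1) _ (by omega), List.nil_append]
    rw [PySem.List.pyRange_one_append (a := 0) (m := n - 1) (b := 2 * (n - 1)) (by omega) (by omega)]
    rw [List.map_append]
    congr 1
    · -- ascending half: the formula is the identity on [0, n-1)
      rw [show List.map (fun k => n - 1 - |k - (n - 1)|) (PySem.List.pyRange 0 (n - 1) 1)
            = List.map id (PySem.List.pyRange 0 (n - 1) 1) from
          List.map_congr_left (by
            intro x hx
            rw [PySem.List.mem_pyRange_one] at hx
            simp only [id]
            rw [abs_of_nonpos (by omega)]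
            omega)]
      rw [List.map_id]
    · -- descending half: reflection gives n-1, n-2, …, 1
      rw [PySem.List.pyRange_one (a := n - 1) (b := 2 * (n - 1)),
          PySem.List.pyRange_neg_one (a := n - 1) (b := 0), List.map_map,
          show (2 * (n - 1) - (n - 1)).toNat = (n - 1 - 0).toNat by omega]
      refine List.map_congr_left ?_
      intro j hj
      rw [List.mem_range] at hj
      simp only [Function.comp]
      rw [abs_of_nonneg (by omega)]
      omega

-- ===== VERDICT (by name: the statement is the Claim_ definition above) =====
theorem sequenced_spec : Claim_equal_sequenced := by
  intro n _
  exact sequenced_spec_aux n
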